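-- pv_equiv track=rewrite | github.com/baites/examples | coding/codeforces/contests/1328/ternary-xor/ternary-xor.py | compose_solution
-- ===== SOURCE A (Python) =====
-- def compose_solution(n, x):
--     flag = False
--     a_string = ''
--     b_string = ''
--     for c in x:
--         if not flag and c == '2':
--             a_digit = 1
--             b_digit = 1
--         elif not flag and c == '1':
--             a_digit = 1
--             b_digit = 0
--             flag = True
--         else:
--             a_digit = 0
--             b_digit = int(c)
--         a_string += str(a_digit)
--         b_string += str(b_digit)
--     return a_string, b_string
-- ===== SOURCE B (Python) =====
-- def _split_digit(i, c, idx):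
--     a = 1 if (i < idx and c == '2') or i == idx else 0
--     return str(a), str(int(c) - a)
--
-- def compose_solution(n, x):
--     idx = next((i for i, c in enumerate(x) if c == '1'), len(x))
--     parts = [_split_digit(i, c, idx) for i, c in enumerate(x)]
--     return ''.join(p[0] for p in parts), ''.join(p[1] for p in parts)
-- ===== Notes on version B (the rewrite author's own statement) =====
-- stated objective: alternative
-- what changed: Replaced the mutable flag threaded through the loop by a precomputed split index (first position of '1', defaulting to len(x)) and a per-digit arithmetic rule a=[i<idx and c=='2' or i==idx], b=int(c)-a, collecting the pieces and joining once.
import Mathlib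
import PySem

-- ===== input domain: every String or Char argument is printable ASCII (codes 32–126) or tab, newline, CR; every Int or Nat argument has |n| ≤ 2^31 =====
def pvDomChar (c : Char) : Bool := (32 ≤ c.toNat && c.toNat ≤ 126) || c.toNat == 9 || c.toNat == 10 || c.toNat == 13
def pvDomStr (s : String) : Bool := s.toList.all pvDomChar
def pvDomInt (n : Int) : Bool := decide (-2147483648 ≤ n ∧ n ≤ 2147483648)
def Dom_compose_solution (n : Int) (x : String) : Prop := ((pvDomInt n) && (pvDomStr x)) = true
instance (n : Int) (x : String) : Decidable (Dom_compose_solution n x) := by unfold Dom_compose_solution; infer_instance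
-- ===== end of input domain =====

-- B replaces A's running flag by a precomputed split index plus per-digit arithmetic (alternative decomposition, same cost).

-- int(c) for a single character c (Python raises ValueError where this is none; Pre_ excludes that)
def pvDigit (c : Char) : Int := (PySem.Int.ofChars? [c]).getD 0

-- ===== PORT A =====
def compose_solution (n : Int) (x : String) : String × String :=
  let st := x.toList.foldl (fun (st : Bool × List Char × List Char) c =>
      if st.1 = false ∧ c = '2' then
        (st.1, st.2.1 ++ PySem.Int.toChars 1, st.2.2 ++ PySem.Int.toChars 1)
      else if st.1 = false ∧ c = '1' then
        (true, st.2.1 ++ PySem.Int.toChars 1, st.2.2 ++ PySem.Int.toChars 0)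
      else
        (st.1, st.2.1 ++ PySem.Int.toChars 0, st.2.2 ++ PySem.Int.toChars (pvDigit c)))
    (false, [], [])
  (String.mk st.2.1, String.mk st.2.2)

-- ===== PORT B =====
-- _split_digit(i, c, idx) of Source B
def pvSplitDigit (i : Int) (c : Char) (idx : Int) : List Char × List Char :=
  let a : Int := if (i < idx ∧ c = '2') ∨ i = idx then 1 else 0
  (PySem.Int.toChars a, PySem.Int.toChars (pvDigit c - a))

-- next((i for i,c in enumerate(x) if c=='1'), len(x)) is List.findIdx (returns length when absent)
def compose_solution_alt (n : Int) (x : String) : String × String :=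
  let idx : Int := (x.toList.findIdx (fun c => c == '1') : Nat)
  let parts := (PySem.List.enumerate x.toList).map (fun p => pvSplitDigit p.1 p.2 idx)
  (String.mk ((parts.map Prod.fst).flatten), String.mk ((parts.map Prod.snd).flatten))

-- ===== PRECONDITION & SPEC =====
-- Pre_ excludes exactly the inputs where Python's int(c) raises ValueError: x must consist of ASCII digits.
def Pre_compose_solution (n : Int) (x : String) : Prop := x.toList.all Char.isDigit = true
instance (n : Int) (x : String) : Decidable (Pre_compose_solution n x) := by unfold Pre_compose_solution; infer_instance
def pvWitness_compose_solution : Int × String := (3, "20121")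

def Spec_compose_solution (n : Int) (x : String) (out : String × String) : Prop := out = compose_solution_alt n x
instance (n : Int) (x : String) (out : String × String) : Decidable (Spec_compose_solution n x out) := by unfold Spec_compose_solution; infer_instance

-- ===== CLAIM (what is proved, stated in full; the proofs are below) =====
def Claim_equal_compose_solution : Prop := ∀ (n : Int) (x : String), Dom_compose_solution n x → Pre_compose_solution n x → Spec_compose_solution n x (compose_solution n x)

-- ===== LEMMAS AND PROOFS =====

-- A's loop body, named for the proofs
def pvStepA (st : Bool × List Char × List Char) (c : Char) : Bool × List Char × List Char :=
  if st.1 = false ∧ c = '2' then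
    (st.1, st.2.1 ++ PySem.Int.toChars 1, st.2.2 ++ PySem.Int.toChars 1)
  else if st.1 = false ∧ c = '1' then
    (true, st.2.1 ++ PySem.Int.toChars 1, st.2.2 ++ PySem.Int.toChars 0)
  else
    (st.1, st.2.1 ++ PySem.Int.toChars 0, st.2.2 ++ PySem.Int.toChars (pvDigit c))

lemma pvEnumerate_shift (t : List Char) (s : Int) :
    PySem.List.enumerate t (s + 1) = (PySem.List.enumerate t s).map (fun p => (p.1 + 1, p.2)) := by
  induction t generalizing s with
  | nil => simp [PySem.List.enumerate_nil]
  | cons c t ih =>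
      rw [PySem.List.enumerate_cons, PySem.List.enumerate_cons]
      simp only [List.map_cons]
      rw [show s + 1 + 1 = (s + 1) + 1 by ring, ih (s + 1)]

lemma pvSplitDigit_shift (i : Int) (c : Char) (idx : Int) :
    pvSplitDigit (i + 1) c (idx + 1) = pvSplitDigit i c idx := by
  unfold pvSplitDigit
  by_cases h : (i < idx ∧ c = '2') ∨ i = idx
  · rw [if_pos h, if_pos ?_]
    rcases h with ⟨h1, h2⟩ | h1
    · exact Or.inl ⟨by omega, h2⟩
    · exact Or.inr (by omega)
  · rw [if_neg h, if_neg ?_]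
    intro hc
    rcases hc with ⟨h1, h2⟩ | h1
    · exact h (Or.inl ⟨by omega, h2⟩)
    · exact h (Or.inr (by omega))

lemma pvSplit_highIdx (t : List Char) (s idx : Int) (h : idx < s) :
    (PySem.List.enumerate t s).map (fun p => pvSplitDigit p.1 p.2 idx)
      = t.map (fun c => (PySem.Int.toChars 0, PySem.Int.toChars (pvDigit c))) := by
  induction t generalizing s with
  | nil => simp [PySem.List.enumerate_nil]
  | cons c t ih =>
      rw [PySem.List.enumerate_cons]
      simp only [List.map_cons]
      rw [ih (s + 1) (by omega)]
      have hcond : ¬ ((s < idx ∧ c = '2') ∨ s = idx) := by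
        rintro (⟨h1, _⟩ | h1) <;> omega
      simp [pvSplitDigit, hcond]

lemma pvFoldA_true (l : List Char) (a b : List Char) :
    l.foldl pvStepA (true, a, b)
      = (true, a ++ (l.map (fun _ => PySem.Int.toChars 0)).flatten,
               b ++ (l.map (fun c => PySem.Int.toChars (pvDigit c))).flatten) := by
  induction l generalizing a b with
  | nil => simp
  | cons c t ih =>
      simp only [List.foldl_cons]
      rw [show pvStepA (true, a, b) c
            = (true, a ++ PySem.Int.toChars 0, b ++ PySem.Int.toChars (pvDigit c)) by
          simp [pvStepA]]
      rw [ih]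
      simp

lemma pvFoldA_eq_parts (l : List Char) (a b : List Char) :
    l.foldl pvStepA (false, a, b)
      = (l.any (fun c => c == '1'),
         a ++ (((PySem.List.enumerate l 0).map
            (fun p => pvSplitDigit p.1 p.2 ((l.findIdx (fun c => c == '1') : Nat)))).map Prod.fst).flatten,
         b ++ (((PySem.List.enumerate l 0).map
            (fun p => pvSplitDigit p.1 p.2 ((l.findIdx (fun c => c == '1') : Nat)))).map Prod.snd).flatten) := by
  induction l generalizing a b with
  | nil => simp [PySem.List.enumerate_nil]
  | cons c t ih =>
      simp only [List.foldl_cons]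
      by_cases hc1 : c = '1'
      · subst hc1
        rw [show pvStepA (false, a, b) '1'
              = (true, a ++ PySem.Int.toChars 1, b ++ PySem.Int.toChars 0) by
            simp [pvStepA]]
        rw [pvFoldA_true]
        have hfind : List.findIdx (fun c => c == '1') ('1' :: t) = 0 := by
          simp [List.findIdx_cons]
        rw [PySem.List.enumerate_cons, hfind]
        simp only [List.map_cons, zero_add, Nat.cast_zero]
        rw [pvSplit_highIdx t 1 0 (by norm_num)]
        have h0 : pvSplitDigit 0 '1' 0 = (PySem.Int.toChars 1, PySem.Int.toChars 0) := by decide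
        simp [h0, Function.comp_def]
      · have hstep : List.findIdx (fun c => c == '1') (c :: t)
            = List.findIdx (fun c => c == '1') t + 1 := by
          have hb : (c == '1') = false := by simp [hc1]
          simp [List.findIdx_cons, hb]
        rw [PySem.List.enumerate_cons, hstep]
        set kn : Nat := List.findIdx (fun c => c == '1') t with hk
        have hcast : ((kn + 1 : Nat) : Int) = (kn : Int) + 1 := by push_cast; ring
        rw [hcast]
        simp only [List.map_cons, zero_add]
        have htail : (PySem.List.enumerate t 1).map (fun p => pvSplitDigit p.1 p.2 ((kn : Int) + 1))
            = (PySem.List.enumerate t 0).map (fun p => pvSplitDigit p.1 p.2 (kn : Int)) := by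
          rw [show (1 : Int) = 0 + 1 by ring, pvEnumerate_shift t 0, List.map_map]
          exact List.map_congr_left (fun p _ => pvSplitDigit_shift p.1 p.2 _)
        rw [htail]
        have hidx0 : (0 : Int) ≤ (kn : Int) := Int.natCast_nonneg kn
        by_cases hc2 : c = '2'
        · subst hc2
          rw [show pvStepA (false, a, b) '2'
                = (false, a ++ PySem.Int.toChars 1, b ++ PySem.Int.toChars 1) by
              simp [pvStepA]]
          rw [ih]
          have hhead : pvSplitDigit 0 '2' ((kn : Int) + 1)
              = (PySem.Int.toChars 1, PySem.Int.toChars 1) := by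
            unfold pvSplitDigit
            rw [if_pos (Or.inl ⟨by omega, rfl⟩)]
            rw [show pvDigit '2' = 2 by decide]
            norm_num
          have hb : (('2' : Char) == '1') = false := by decide
          simp [hhead, hb]
        · rw [show pvStepA (false, a, b) c
                = (false, a ++ PySem.Int.toChars 0, b ++ PySem.Int.toChars (pvDigit c)) by
              simp [pvStepA, hc1, hc2]]
          rw [ih]
          have hhead : pvSplitDigit 0 c ((kn : Int) + 1)
              = (PySem.Int.toChars 0, PySem.Int.toChars (pvDigit c)) := by
            unfold pvSplitDigit
            rw [if_neg ?_]
            · norm_num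
            · rintro (⟨_, h2⟩ | h1)
              · exact hc2 h2
              · omega
          have hb : (c == '1') = false := by simp [hc1]
          simp [hhead, hb]

-- ===== VERDICT (by name: the statement is the Claim_ definition above) =====
theorem compose_solution_spec : Claim_equal_compose_solution := by
  intro n x _ _
  unfold Spec_compose_solution compose_solution compose_solution_alt
  rw [show (fun (st : Bool × List Char × List Char) c =>
      if st.1 = false ∧ c = '2' then
        (st.1, st.2.1 ++ PySem.Int.toChars 1, st.2.2 ++ PySem.Int.toChars 1)
      else if st.1 = false ∧ c = '1' then
        (true, st.2.1 ++ PySem.Int.toChars 1, st.2.2 ++ PySem.Int.toChars 0)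
      else
        (st.1, st.2.1 ++ PySem.Int.toChars 0, st.2.2 ++ PySem.Int.toChars (pvDigit c)))
      = pvStepA from rfl]
  rw [pvFoldA_eq_parts]
  rfl
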